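-- pv_equiv track=rewrite | github.com/bharathmrr/Slackbot-Content-Pipeline- | app/keyword/utils.py | find_keyword_themes
-- ===== SOURCE A (Python) =====
-- from typing import List, Dict, Set
-- from collections import Counter
--
-- def find_keyword_themes(keywords: List[str]) -> Dict[str, List[str]]:
--     """Find common themes in keywords."""
--     themes = {}
--
--     # Extract all words
--     all_words = []
--     for keyword in keywords:
--         words = [w.lower() for w in keyword.split() if len(w) > 2]
--         all_words.extend(words)
--
--     # Find most common words
--     word_counts = Counter(all_words)
--     common_words = [word for word, count in word_counts.most_common(10) if count > 1]
--
--     # Group keywords by common words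
--     for word in common_words:
--         themes[word] = [kw for kw in keywords if word in kw.lower()]
--
--     return themes
-- ===== SOURCE B (Python) =====
-- def find_keyword_themes(keywords):
--     """Find common themes in keywords."""
--     # all qualifying words, lowercased, in one flat comprehension
--     words = [w.lower() for kw in keywords for w in kw.split() if len(w) > 2]
--     # one counting pass into a plain dict (keys keep first-occurrence order)
--     freq = {}
--     for w in words:
--         freq[w] = freq.get(w, 0) + 1
--     # ten most frequent words by repeated first-maximum extraction (no sort)
--     remaining = list(freq)
--     top = []
--     for _ in range(10):
--         if not remaining:
--             break
--         best = max(remaining, key=freq.get)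
--         top.append(best)
--         remaining.remove(best)
--     common = [w for w in top if freq[w] > 1]
--     # one pass over the keywords: each keyword, lowered once, is appended to
--     # the entry of every common word it contains (keyword-first grouping)
--     themes = {w: [] for w in common}
--     for kw in keywords:
--         lkw = kw.lower()
--         for w in common:
--             if w in lkw:
--                 themes[w].append(kw)
--     return themes
-- ===== Notes on version B (the rewrite author's own statement) =====
-- stated objective: alternative
-- what changed: B drops Counter and most_common entirely: it counts words in one pass into a plain dict, picks the ten most frequent words by repeated first-maximum extraction instead of a stable sort, and groups in a single keyword-first pass appending each lowered-once keyword into a dict pre-keyed by the common words, instead of rescanning all keywords per common word.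
import Mathlib
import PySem

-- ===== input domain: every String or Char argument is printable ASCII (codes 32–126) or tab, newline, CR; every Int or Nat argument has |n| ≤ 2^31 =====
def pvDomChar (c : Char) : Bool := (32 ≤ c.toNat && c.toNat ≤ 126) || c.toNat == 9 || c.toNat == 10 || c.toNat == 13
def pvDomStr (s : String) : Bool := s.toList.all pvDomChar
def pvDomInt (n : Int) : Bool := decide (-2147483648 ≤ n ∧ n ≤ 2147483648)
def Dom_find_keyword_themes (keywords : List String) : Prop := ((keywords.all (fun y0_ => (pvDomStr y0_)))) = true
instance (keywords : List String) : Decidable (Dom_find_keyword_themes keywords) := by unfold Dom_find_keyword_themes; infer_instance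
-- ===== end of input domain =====

-- B replaces Counter + most_common(10) by a one-pass hand count into a dict plus ten
-- first-maximum extractions, and groups in one keyword-first pass into a dict pre-keyed by
-- the common words.

-- ===== PORT A =====
-- literal transliteration of A: collect words, Counter, most_common(10) (= stable sort by
-- count descending, take 10), then for each common word scan all keywords.
def find_keyword_themes (keywords : List String) : List (String × List String) :=
  let all_words := keywords.foldl (fun acc keyword =>
      acc ++ ((PySem.Str.split₀ keyword).filter (fun w => decide (2 < PySem.Str.len w))).map PySem.Str.lower) []
  let word_counts := PySem.Dict.counter all_words
  let common_words := (((PySem.List.sorted word_counts.items (fun kv => kv.2) true).take 10).filter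
      (fun kv => decide (1 < kv.2))).map (fun kv => kv.1)
  (common_words.foldl (fun themes word =>
      themes.insert word (keywords.filter (fun kw => PySem.Str.isIn word (PySem.Str.lower kw))))
    (PySem.Dict.empty : PySem.Dict String (List String))).items

-- ===== PORT B =====
-- Source B's `for _ in range(10): if not remaining: break; best = max(remaining, key=freq.get);
-- top.append(best); remaining.remove(best)` — fuel = the ten loop iterations; max(remaining, key)
-- on a nonempty list is PySem.List.max? (first maximal element), `if not remaining: break` is the
-- `none` branch (max? = none ↔ the list is empty), and list.remove of the present element `best`
-- is List.erase (exact: PySem.List.remove?_eq_some_erase).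
def pvPickB (key : String → Int) : Nat → List String → List String → List String
  | 0, _, top => top
  | n+1, remaining, top =>
    match PySem.List.max? remaining key with
    | none => top
    | some best => pvPickB key n (remaining.erase best) (top ++ [best])

def find_keyword_themes_alt (keywords : List String) : List (String × List String) :=
  let words := keywords.flatMap (fun kw =>
      ((PySem.Str.split₀ kw).filter (fun w => decide (2 < PySem.Str.len w))).map PySem.Str.lower)
  let freq := words.foldl (fun d w => d.insert w (d.getD w 0 + 1))
      (PySem.Dict.empty : PySem.Dict String Int)
  let remaining := freq.keys
  let top := pvPickB (fun w => freq.getD w 0) 10 remaining []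
  let common := top.filter (fun w => decide (1 < freq.getD w 0))
  (keywords.foldl (fun themes kw =>
      let lkw := PySem.Str.lower kw
      common.foldl (fun themes w =>
        if PySem.Str.isIn w lkw then themes.modify w [] (fun l => l ++ [kw]) else themes) themes)
    (PySem.Dict.mk (common.map (fun w => (w, ([] : List String)))))).items

-- ===== PRECONDITION & SPEC =====
def Spec_find_keyword_themes (keywords : List String) (out : List (String × List String)) : Prop := out = find_keyword_themes_alt keywords
instance (keywords : List String) (out : List (String × List String)) : Decidable (Spec_find_keyword_themes keywords out) := by unfold Spec_find_keyword_themes; infer_instance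

-- ===== CLAIM (what is proved, stated in full; the proofs are below) =====
def Claim_equal_find_keyword_themes : Prop := ∀ (keywords : List String), Dom_find_keyword_themes keywords → Spec_find_keyword_themes keywords (find_keyword_themes keywords)

-- ===== LEMMAS AND PROOFS =====

-- max? over a snoc list is one step of its running-max fold
theorem pvMaxSnocNone (key : String → Int) (ys : List String) (x : String)
    (hys : PySem.List.max? ys key = none) :
    PySem.List.max? (ys ++ [x]) key = some x := by
  unfold PySem.List.max? at hys ⊢
  rw [List.foldl_append, hys]
  rfl

theorem pvMaxSnocSome (key : String → Int) (ys : List String) (x m' : String)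
    (hys : PySem.List.max? ys key = some m') :
    PySem.List.max? (ys ++ [x]) key = (if key m' < key x then some x else some m') := by
  unfold PySem.List.max? at hys ⊢
  rw [List.foldl_append, hys]
  rfl

theorem pvSortedSnoc (key : String → Int) (ys : List String) (x : String) :
    PySem.List.sorted (ys ++ [x]) key true
      = PySem.List.insertBy (fun a b => decide (key b < key a)) x (PySem.List.sorted ys key true) := by
  rw [PySem.List.sorted_rev_eq_foldl_insertBy, PySem.List.sorted_rev_eq_foldl_insertBy,
    List.foldl_append]
  rfl

-- CORE: the first maximal element heads the stable descending sort
theorem pvCore (key : String → Int) (ds : List String) (m : String)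
    (h : PySem.List.max? ds key = some m) :
    PySem.List.sorted ds key true = m :: PySem.List.sorted (ds.erase m) key true := by
  induction ds using List.reverseRecOn generalizing m with
  | nil => simp [PySem.List.max?] at h
  | append_singleton ys x ih =>
    rw [pvSortedSnoc]
    cases hys : PySem.List.max? ys key with
    | none =>
      have hnil : ys = [] := (PySem.List.max?_eq_none_iff _ _).mp hys
      subst hnil
      rw [pvMaxSnocNone key [] x hys] at h
      have h' : x = m := by injection h
      subst h'
      simp [PySem.List.sorted, PySem.List.insertBy]
    | some m' =>
      rw [pvMaxSnocSome key ys x m' hys] at h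
      by_cases hlt : key m' < key x
      · rw [if_pos hlt] at h
        have hxm : x = m := by injection h
        subst hxm
        have hxnot : x ∉ ys := by
          intro hmem
          exact absurd (PySem.List.max?_isMax hys x hmem) (by omega)
        have herase : (ys ++ [x]).erase x = ys := by
          rw [List.erase_append_right _ hxnot]; simp
        rw [herase]
        -- insert at the head: every element of sorted ys has key < key x
        cases hs : PySem.List.sorted ys key true with
        | nil => simp [PySem.List.insertBy]
        | cons hd tl =>
          have hhd : hd ∈ ys := by
            have : hd ∈ PySem.List.sorted ys key true := by rw [hs]; simp
            rwa [PySem.List.mem_sorted] at this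
          have : key hd < key x := lt_of_le_of_lt (PySem.List.max?_isMax hys hd hhd) hlt
          simp [PySem.List.insertBy, this]
      · rw [if_neg hlt] at h
        have hmm : m' = m := by injection h
        subst hmm
        have hmem : m' ∈ ys := PySem.List.max?_mem hys
        have herase : (ys ++ [x]).erase m' = ys.erase m' ++ [x] :=
          List.erase_append_left _ hmem
        rw [herase, pvSortedSnoc, ih m' hys]
        have hb : (decide (key m' < key x)) = false := by simpa using hlt
        simp [PySem.List.insertBy, hb]

-- n first-maximum extractions = the first n elements of the stable descending sort
theorem pvSelTake (key : String → Int) (n : Nat) :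
    ∀ (ds : List String), ∀ (top : List String),
    pvPickB key n ds top = top ++ (PySem.List.sorted ds key true).take n := by
  induction n with
  | zero => intro ds top; simp [pvPickB]
  | succ n ih =>
    intro ds top
    cases hm : PySem.List.max? ds key with
    | none =>
      have hnil : ds = [] := (PySem.List.max?_eq_none_iff _ _).mp hm
      subst hnil
      simp [pvPickB, PySem.List.max?, PySem.List.sorted]
    | some m =>
      simp only [pvPickB, hm]
      rw [ih (ds.erase m) (top ++ [m]), pvCore key ds m hm]
      simp

-- a stable sort keyed through a pair-builder commutes with the map
theorem pvInsertByMap (key : String → Int) (f : String → String × Int)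
    (hf : ∀ a, (f a).2 = key a) (x : String) (l : List String) :
    PySem.List.insertBy (fun a b => decide (b.2 < a.2)) (f x) (l.map f)
      = (PySem.List.insertBy (fun a b => decide (key b < key a)) x l).map f := by
  induction l with
  | nil => simp [PySem.List.insertBy]
  | cons y ys ih =>
    by_cases hlt : key y < key x
    · simp [PySem.List.insertBy, hf, hlt]
    · simp [PySem.List.insertBy, hf, hlt, ih]

theorem pvSortedMap (key : String → Int) (f : String → String × Int)
    (hf : ∀ a, (f a).2 = key a) (ds : List String) :
    PySem.List.sorted (ds.map f) (fun kv => kv.2) true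
      = (PySem.List.sorted ds key true).map f := by
  rw [PySem.List.sorted_rev_eq_foldl_insertBy, PySem.List.sorted_rev_eq_foldl_insertBy]
  induction ds using List.reverseRecOn with
  | nil => simp
  | append_singleton ys x ih =>
    simp only [List.map_append, List.map_cons, List.map_nil, List.foldl_append, List.foldl_cons,
      List.foldl_nil, ih]
    exact pvInsertByMap key f hf x _

-- value stored under a key present in a map-built literal dict
theorem pvGetDMkMap (all : List String) (g : String → List String) (h : String) (hmem : h ∈ all) :
    (PySem.Dict.mk (all.map (fun w => (w, g w)))).getD h [] = g h := by
  induction all with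
  | nil => cases hmem
  | cons a t ih =>
    rcases List.mem_cons.mp hmem with h1 | h1
    · subst h1; simp [PySem.Dict.getD, PySem.Dict.get?_mk_cons]
    · by_cases hah : a = h
      · subst hah; simp [PySem.Dict.getD, PySem.Dict.get?_mk_cons]
      · have hb : (a == h) = false := beq_eq_false_iff_ne.mpr hah
        simpa [PySem.Dict.getD, PySem.Dict.get?_mk_cons, hb] using ih h1

theorem pvContainsMkMap (all : List String) (g : String → List String) (h : String) (hmem : h ∈ all) :
    (PySem.Dict.mk (all.map (fun w => (w, g w)))).contains h = true := by
  simp only [PySem.Dict.contains_mk, List.any_eq_true]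
  exact ⟨(h, g h), List.mem_map_of_mem hmem, by simp⟩

-- modifying a key present in a map-built literal dict rewrites exactly that entry
theorem pvModifyMkMap (all : List String) (g : String → List String) (a : String) (ha : a ∈ all)
    (kw : String) :
    (PySem.Dict.mk (all.map (fun w => (w, g w)))).modify a [] (fun l => l ++ [kw])
      = PySem.Dict.mk (all.map (fun w => (w, if w = a then g w ++ [kw] else g w))) := by
  unfold PySem.Dict.modify PySem.Dict.insert
  rw [pvGetDMkMap all g a ha, pvContainsMkMap all g a ha, if_pos rfl]
  simp only [PySem.Dict.mk.injEq, List.map_map]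
  apply List.map_congr_left
  intro w hw
  by_cases hwa : w = a
  · subst hwa; simp
  · have hb : (w == a) = false := beq_eq_false_iff_ne.mpr hwa
    simp [hwa]

-- one keyword's inner loop over the common words, on a dict keyed exactly by `all`
theorem pvInnerFold (all : List String) (kw : String) :
    ∀ (todo : List String), todo.Nodup → (∀ w ∈ todo, w ∈ all) → ∀ (g : String → List String),
    todo.foldl (fun t w => if PySem.Str.isIn w (PySem.Str.lower kw) then t.modify w [] (fun l => l ++ [kw]) else t)
        (PySem.Dict.mk (all.map (fun w => (w, g w))))
      = PySem.Dict.mk (all.map (fun w => (w, if w ∈ todo ∧ PySem.Str.isIn w (PySem.Str.lower kw) then g w ++ [kw] else g w))) := by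
  intro todo
  induction todo with
  | nil => intro _ _ g; simp
  | cons a t ih =>
    intro hnd hsub g
    have hamem : a ∈ all := hsub a (by simp)
    obtain ⟨hat, hndt⟩ := List.nodup_cons.mp hnd
    have hsub' : ∀ w ∈ t, w ∈ all := fun w hw => hsub w (List.mem_cons_of_mem _ hw)
    simp only [List.foldl_cons]
    by_cases hp : PySem.Str.isIn a (PySem.Str.lower kw) = true
    · have hp' : PySem.Chars.isIn a.toList (PySem.Chars.lower kw.toList) = true := by
        simpa using hp
      rw [if_pos hp, pvModifyMkMap all g a hamem kw,
        ih hndt hsub' (fun w => if w = a then g w ++ [kw] else g w)]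
      simp only [PySem.Dict.mk.injEq]
      apply List.map_congr_left
      intro w hw
      by_cases hwa : w = a
      · subst hwa
        simp [hat, hp']
      · simp [hwa, List.mem_cons]
    · have hp' : ¬ PySem.Chars.isIn a.toList (PySem.Chars.lower kw.toList) = true := by
        simpa using hp
      rw [if_neg hp, ih hndt hsub' g]
      simp only [PySem.Dict.mk.injEq]
      apply List.map_congr_left
      intro w hw
      by_cases hwa : w = a
      · subst hwa
        simp [hat, hp']
      · simp [hwa, List.mem_cons]

-- B's whole grouping loop
theorem pvBFoldGen (ws : List String) (hnd : ws.Nodup) :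
    ∀ (kws : List String) (g : String → List String),
    (kws.foldl (fun themes kw =>
        ws.foldl (fun t w =>
          if PySem.Str.isIn w (PySem.Str.lower kw) then t.modify w [] (fun l => l ++ [kw]) else t) themes)
      (PySem.Dict.mk (ws.map (fun w => (w, g w))))).items
      = ws.map (fun w => (w, g w ++ kws.filter (fun kw => PySem.Str.isIn w (PySem.Str.lower kw)))) := by
  intro kws
  induction kws with
  | nil => intro g; simp
  | cons kw kws ih =>
    intro g
    simp only [List.foldl_cons]
    rw [pvInnerFold ws kw ws hnd (fun _ h => h) g,
      ih (fun w => if w ∈ ws ∧ PySem.Str.isIn w (PySem.Str.lower kw) then g w ++ [kw] else g w)]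
    apply List.map_congr_left
    intro w hw
    simp only [hw, true_and, List.filter_cons]
    by_cases hq : PySem.Chars.isIn w.toList (PySem.Chars.lower kw.toList) = true
    · simp [hq, List.append_assoc]
    · simp [hq]

-- A's grouping loop: inserting distinct fresh keys appends them in order
theorem pvAFoldGen (F : String → List String) :
    ∀ (ws : List String) (pre : List (String × List String)), ws.Nodup →
    (∀ w ∈ ws, ∀ q ∈ pre, q.1 ≠ w) →
    (ws.foldl (fun t w => t.insert w (F w)) (PySem.Dict.mk pre)).items
      = pre ++ ws.map (fun w => (w, F w)) := by
  intro ws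
  induction ws with
  | nil => intro pre _ _; simp
  | cons a t ih =>
    intro pre hnd hfresh
    obtain ⟨hat, hndt⟩ := List.nodup_cons.mp hnd
    simp only [List.foldl_cons]
    have hc : (PySem.Dict.mk pre).contains a = false := by
      simp only [PySem.Dict.contains_mk, List.any_eq_false]
      intro q hq
      simpa using hfresh a (by simp) q hq
    have hins : (PySem.Dict.mk pre).insert a (F a) = PySem.Dict.mk (pre ++ [(a, F a)]) := by
      unfold PySem.Dict.insert
      rw [hc]
      simp
    rw [hins, ih (pre ++ [(a, F a)]) hndt]
    · simp
    · intro w hw q hq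
      rcases List.mem_append.mp hq with h1 | h1
      · exact hfresh w (List.mem_cons_of_mem _ hw) q h1
      · intro hcontra
        apply hat
        have hq' : q = (a, F a) := by simpa using h1
        have haw : a = w := by rw [hq'] at hcontra; exact hcontra
        rwa [haw]

theorem pvAFold (keywords ws : List String) (hnd : ws.Nodup) :
    (ws.foldl (fun themes word =>
        themes.insert word (keywords.filter (fun kw => PySem.Str.isIn word (PySem.Str.lower kw))))
      (PySem.Dict.empty : PySem.Dict String (List String))).items
      = ws.map (fun w => (w, keywords.filter (fun kw => PySem.Str.isIn w (PySem.Str.lower kw)))) := by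
  have h := pvAFoldGen (fun w => keywords.filter (fun kw => PySem.Str.isIn w (PySem.Str.lower kw)))
    ws [] hnd (by simp)
  simpa using h

theorem pvBFold (keywords ws : List String) (hnd : ws.Nodup) :
    (keywords.foldl (fun themes kw =>
        ws.foldl (fun t w =>
          if PySem.Str.isIn w (PySem.Str.lower kw) then t.modify w [] (fun l => l ++ [kw]) else t) themes)
      (PySem.Dict.mk (ws.map (fun w => (w, ([] : List String)))))).items
      = ws.map (fun w => (w, keywords.filter (fun kw => PySem.Str.isIn w (PySem.Str.lower kw)))) := by
  have h := pvBFoldGen ws hnd keywords (fun _ => ([] : List String))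
  simpa using h

-- the two common-word lists are the same list
theorem pvCommonEq (words : List String) :
    (((PySem.List.sorted (PySem.Dict.counter words).items (fun kv => kv.2) true).take 10).filter
      (fun kv => decide (1 < kv.2))).map (fun kv => kv.1)
    = (pvPickB (fun w => (PySem.Dict.counter words).getD w 0) 10 (PySem.Dict.counter words).keys []).filter
        (fun w => decide (1 < (PySem.Dict.counter words).getD w 0)) := by
  have hkey : (fun w => (PySem.Dict.counter words).getD w 0) = (fun w => ((words.count w : Int))) := by
    funext w; exact PySem.Dict.getD_counter words w
  rw [PySem.Dict.items_counter, PySem.Dict.keys_counter, hkey,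
    pvSortedMap (fun w => ((words.count w : Int))) (fun k => (k, (words.count k : Int))) (fun _ => rfl),
    pvSelTake]
  simp only [List.nil_append, ← List.map_take, List.filter_map, List.map_map]
  have hid : ((fun kv : String × Int => kv.1) ∘ fun k => (k, (words.count k : Int))) = id := rfl
  rw [hid, List.map_id]
  apply List.filter_congr
  intro w _
  simp only [Function.comp, PySem.Dict.getD_counter]

theorem pvCommonNodup (words : List String) :
    ((pvPickB (fun w => (PySem.Dict.counter words).getD w 0) 10 (PySem.Dict.counter words).keys []).filter
        (fun w => decide (1 < (PySem.Dict.counter words).getD w 0))).Nodup := by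
  rw [pvSelTake]
  have hperm : (PySem.List.sorted (PySem.Dict.counter words).keys
        (fun w => (PySem.Dict.counter words).getD w 0) true).Perm
      (PySem.Dict.counter words).keys := PySem.List.sorted_perm _ _ _
  have hnd := hperm.nodup_iff.mpr (PySem.Dict.nodup_keys_counter words)
  simp only [List.nil_append]
  exact List.Nodup.filter _ (List.Nodup.sublist (List.take_sublist _ _) hnd)

-- ===== VERDICT (by name: the statement is the Claim_ definition above) =====
theorem find_keyword_themes_spec : Claim_equal_find_keyword_themes := by
  intro keywords _
  unfold Spec_find_keyword_themes
  simp only [find_keyword_themes, find_keyword_themes_alt]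
  rw [PySem.List.foldl_append_eq_flatMap]
  simp only [List.nil_append]
  rw [PySem.Dict.foldl_insert_getD_add_one_eq_counter]
  rw [pvCommonEq, pvAFold _ _ (pvCommonNodup _), pvBFold _ _ (pvCommonNodup _)]
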